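-- pv_equiv track=rewrite | github.com/AlexChanson/algo_av_l2 | activite_1.py | combienInf4
-- ===== SOURCE A (Python) =====
-- def combienInf4(n):
--     if n < 10:
--         if n <= 4:
--             return 1
--         else:
--             return 0
--     else:
--         m = n % 10
--         inc = 0
--         if m <= 4:
--             inc = 1
--         return inc + combienInf4(n // 10)
-- ===== SOURCE B (Python) =====
-- def combienInf4(n):
--     count = 0
--     while n >= 10:
--         if n % 10 <= 4:
--             count += 1
--         n //= 10
--     return count + (1 if n <= 4 else 0)
-- ===== Notes on version B (the rewrite author's own statement) =====
-- stated objective: alternative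
-- what changed: Replaces the recursive digit-peeling with an explicit while loop carrying a count accumulator.
import Mathlib
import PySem

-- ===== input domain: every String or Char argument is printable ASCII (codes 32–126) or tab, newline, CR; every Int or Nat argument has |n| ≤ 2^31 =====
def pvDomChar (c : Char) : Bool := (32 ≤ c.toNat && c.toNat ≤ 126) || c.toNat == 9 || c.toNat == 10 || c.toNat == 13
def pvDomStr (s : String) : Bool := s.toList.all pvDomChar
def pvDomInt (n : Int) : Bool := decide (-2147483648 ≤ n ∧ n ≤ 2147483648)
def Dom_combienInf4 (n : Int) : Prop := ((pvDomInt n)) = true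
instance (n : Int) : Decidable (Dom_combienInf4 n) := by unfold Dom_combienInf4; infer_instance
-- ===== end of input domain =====

-- B replaces A's recursive digit-peeling with an explicit while loop carrying a count accumulator (alternative decomposition, same cost).


-- ===== PORT A =====
def combienInf4 (n : Int) : Int :=
  if n < 10 then
    if n ≤ 4 then 1 else 0
  else
    let m := PySem.Int.mod n 10
    let inc : Int := if m ≤ 4 then 1 else 0
    inc + combienInf4 (PySem.Int.floordiv n 10)
termination_by n.toNat
decreasing_by
  rw [PySem.Int.floordiv_eq_ediv_of_pos (by omega : (0:Int) < 10)]
  omega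

-- ===== PORT B =====
-- the while loop of Source B: state (n, count)
def combienInf4Loop (n count : Int) : Int :=
  if n ≥ 10 then
    combienInf4Loop (PySem.Int.floordiv n 10)
      (if PySem.Int.mod n 10 ≤ 4 then count + 1 else count)
  else
    count
termination_by n.toNat
decreasing_by
  rw [PySem.Int.floordiv_eq_ediv_of_pos (by omega : (0:Int) < 10)]
  omega

-- Source B also needs the final value of n after the loop, for the post-loop test
def combienInf4Final (n : Int) : Int :=
  if n ≥ 10 then combienInf4Final (PySem.Int.floordiv n 10) else n
termination_by n.toNat
decreasing_by
  rw [PySem.Int.floordiv_eq_ediv_of_pos (by omega : (0:Int) < 10)]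
  omega

def combienInf4_alt (n : Int) : Int :=
  combienInf4Loop n 0 + (if combienInf4Final n ≤ 4 then 1 else 0)

-- ===== PRECONDITION & SPEC =====
def Spec_combienInf4 (n : Int) (out : Int) : Prop := out = combienInf4_alt n
instance (n : Int) (out : Int) : Decidable (Spec_combienInf4 n out) := by unfold Spec_combienInf4; infer_instance

-- ===== CLAIM (what is proved, stated in full; the proofs are below) =====
def Claim_equal_combienInf4 : Prop := ∀ (n : Int), Dom_combienInf4 n → Spec_combienInf4 n (combienInf4 n)

-- ===== LEMMAS AND PROOFS =====

theorem combienInf4_loop_eq (n : Int) :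
    ∀ c, combienInf4Loop n c + (if combienInf4Final n ≤ 4 then 1 else 0) = c + combienInf4 n := by
  induction n using combienInf4.induct with
  | case1 n h1 h2 =>
      intro c
      rw [combienInf4Loop, combienInf4Final, combienInf4]
      simp [h1, h2, show ¬ n ≥ 10 by omega]
  | case2 n h1 h2 =>
      intro c
      rw [combienInf4Loop, combienInf4Final, combienInf4]
      simp [h1, h2, show ¬ n ≥ 10 by omega]
  | case3 n h1 ih =>
      intro c
      rw [combienInf4Loop, combienInf4Final, combienInf4]
      simp only [show n ≥ 10 by omega, if_pos, h1]
      rw [ih]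
      split <;> simp <;> ring

-- ===== VERDICT (by name: the statement is the Claim_ definition above) =====
theorem combienInf4_spec : Claim_equal_combienInf4 := by
  intro n _
  unfold Spec_combienInf4 combienInf4_alt
  rw [combienInf4_loop_eq n 0]
  ring
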